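-- pv_equiv track=rewrite | github.com/rodrigoinfo30/Files_Python | CodBarra/BoletoCodBarra.py | GeraCodBarraBoleto
-- ===== SOURCE A (Python) =====
-- def GeraCodBarraBoleto (valor, images_folder="images"):
--     fino = 1
--     largo = 4
--     altura = 55
--
--     # Inicializa a lista de códigos
--     barcodes = [""] * 100
--     barcodes[0] = "00110"
--     barcodes[1] = "10001"
--     barcodes[2] = "01001"
--     barcodes[3] = "11000"
--     barcodes[4] = "00101"
--     barcodes[5] = "10100"
--     barcodes[6] = "01100"
--     barcodes[7] = "00011"
--     barcodes[8] = "10010"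
--     barcodes[9] = "01010"
--
--     # Geração dos códigos combinados
--     for f1 in range(9, -1, -1):
--         for f2 in range(9, -1, -1):
--             f = f1 * 10 + f2
--             texto = ""
--             for i in range(5):
--                 texto += barcodes[f1][i:i+1] + barcodes[f2][i:i+1]
--             barcodes[f] = texto
--
--     # Ajusta o valor para ter comprimento par
--     texto = valor
--     if len(texto) % 2 != 0:
--         texto = "0" + texto
--
--     # StringBuilder equivalente
--     codbarras = []
--
--     # Guarda inicial
--     codbarras.append(f'<img src="{images_folder}/p.gif" width="{fino}" height="{altura}" border=0>')
--     codbarras.append(f'<img src="{images_folder}/b.gif" width="{fino}" height="{altura}" border=0>')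
--     codbarras.append(f'<img src="{images_folder}/p.gif" width="{fino}" height="{altura}" border=0>')
--     codbarras.append(f'<img src="{images_folder}/b.gif" width="{fino}" height="{altura}" border=0>')
--
--     # Dados
--     while len(texto) > 0:
--         i = int(texto[:2])
--         texto = texto[2:]
--         s = barcodes[i]
--
--         for j in range(0, 10, 2):
--             f1 = fino if s[j] == '0' else largo
--             codbarras.append(f'<img src="{images_folder}/p.gif" width="{f1}" height="{altura}" border=0>')
--
--             f2 = fino if s[j+1] == '0' else largo
--             codbarras.append(f'<img src="{images_folder}/b.gif" width="{f2}" height="{altura}" border=0>')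
--
--     # Guarda final
--     codbarras.append(f'<img src="{images_folder}/p.gif" width="{largo}" height="{altura}" border=0>')
--     codbarras.append(f'<img src="{images_folder}/b.gif" width="{fino}" height="{altura}" border=0>')
--     codbarras.append(f'<img src="{images_folder}/p.gif" width="{fino}" height="{altura}" border=0>')
--
--     return "".join(codbarras)
-- ===== SOURCE B (Python) =====
-- def GeraCodBarraBoleto(valor, images_folder="images"):
--     fino = 1
--     largo = 4
--     altura = 55
--
--     # only the ten base 5-bit patterns; no 100-entry combined table
--     base = ["00110", "10001", "01001", "11000", "00101",
--             "10100", "01100", "00011", "10010", "01010"]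
--
--     def tag(img, w):
--         return f'<img src="{images_folder}/{img}" width="{w}" height="{altura}" border=0>'
--
--     texto = valor if len(valor) % 2 == 0 else "0" + valor
--
--     out = [tag("p.gif", fino), tag("b.gif", fino),
--            tag("p.gif", fino), tag("b.gif", fino)]
--
--     while texto:
--         i = int(texto[:2])
--         texto = texto[2:]
--         p = base[i // 10]
--         b = base[i % 10]
--         for k in range(5):
--             out.append(tag("p.gif", largo if p[k] == '1' else fino))
--             out.append(tag("b.gif", largo if b[k] == '1' else fino))
--
--     out.append(tag("p.gif", largo))
--     out.append(tag("b.gif", fino))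
--     out.append(tag("p.gif", fino))
--     return "".join(out)
-- ===== Notes on version B (the rewrite author's own statement) =====
-- stated objective: simpler
-- what changed: B drops A's triple-nested construction of the 100-entry combined-code table and instead splits each parsed two-character chunk into its digits i//10 and i%10, emitting the interleaved bars directly from the ten base 5-bit patterns via a small tag helper.
import Mathlib
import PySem

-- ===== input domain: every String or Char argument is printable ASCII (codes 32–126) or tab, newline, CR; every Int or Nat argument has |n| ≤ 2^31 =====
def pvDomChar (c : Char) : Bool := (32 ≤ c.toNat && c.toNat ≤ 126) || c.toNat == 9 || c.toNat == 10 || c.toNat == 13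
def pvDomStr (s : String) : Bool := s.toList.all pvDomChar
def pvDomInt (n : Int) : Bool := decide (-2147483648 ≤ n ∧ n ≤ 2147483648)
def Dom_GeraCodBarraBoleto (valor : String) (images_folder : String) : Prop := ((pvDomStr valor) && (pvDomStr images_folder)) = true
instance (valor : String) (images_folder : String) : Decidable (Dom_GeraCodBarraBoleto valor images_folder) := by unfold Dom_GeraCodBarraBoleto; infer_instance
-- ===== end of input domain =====

-- B drops A's 100-entry combined-code table and emits the bars from the ten base patterns
-- via the digit split i//10, i%10 — objective: simpler (no timing claim).

-- ===== PORT A =====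
-- Python str is ported as List Char (PySem.Chars); f-strings become list concatenations.
-- barcodes = [""]*100 with the ten literal assignments barcodes[0..9] = …:
def pvTableInit : List (List Char) :=
  ((((((((((List.replicate 100 ([] : List Char)).set 0 "00110".toList).set 1
    "10001".toList).set 2 "01001".toList).set 3 "11000".toList).set 4
    "00101".toList).set 5 "10100".toList).set 6 "01100".toList).set 7
    "00011".toList).set 8 "10010".toList).set 9 "01010".toList

-- the nested 'for f1 in range(9,-1,-1): for f2 in range(9,-1,-1)' filling barcodes[f1*10+f2];
-- the write index f = f1*10+f2 is nonnegative for every f1,f2 produced by the ranges, so .toNat is exact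
def pvTable : List (List Char) :=
  (PySem.List.pyRange 9 (-1) (-1)).foldl (fun bc f1 =>
    (PySem.List.pyRange 9 (-1) (-1)).foldl (fun bc f2 =>
      let f := f1 * 10 + f2
      let texto := (PySem.List.pyRange 0 5 1).foldl (fun t i =>
        t ++ PySem.Chars.slice ((PySem.List.pyGet? bc f1).getD []) (some i) (some (i + 1))
          ++ PySem.Chars.slice ((PySem.List.pyGet? bc f2).getD []) (some i) (some (i + 1))) []
      bc.set f.toNat texto) bc) pvTableInit

-- the inner 'for j in range(0, 10, 2)' emitting one p.gif and one b.gif tag per pair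
-- (s[j] cannot raise inside Pre_: every table entry has length 10; getD ' ' is unreachable there)
def pvEmitA (folder : String) (s : List Char) (acc : List (List Char)) : List (List Char) :=
  (PySem.List.pyRange 0 10 2).foldl (fun a j =>
    let f1 : Int := if (PySem.List.pyGet? s j).getD ' ' = '0' then 1 else 4
    let a := a ++ ["<img src=\"".toList ++ folder.toList ++ "/p.gif\" width=\"".toList ++
      PySem.Int.toChars f1 ++ "\" height=\"".toList ++ PySem.Int.toChars 55 ++ "\" border=0>".toList]
    let f2 : Int := if (PySem.List.pyGet? s (j + 1)).getD ' ' = '0' then 1 else 4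
    a ++ ["<img src=\"".toList ++ folder.toList ++ "/b.gif\" width=\"".toList ++
      PySem.Int.toChars f2 ++ "\" height=\"".toList ++ PySem.Int.toChars 55 ++ "\" border=0>".toList]) acc

-- 'while len(texto) > 0': int(texto[:2]) (getD 0 unreachable inside Pre_), table lookup, emit, texto = texto[2:]
def pvLoopA (folder : String) (bc : List (List Char)) : List Char → List (List Char) → List (List Char)
  | [], acc => acc
  | c :: t, acc =>
    let i := (PySem.Int.ofChars? (PySem.Chars.slice (c :: t) none (some 2))).getD 0
    let s := (PySem.List.pyGet? bc i).getD []
    pvLoopA folder bc (PySem.Chars.slice (c :: t) (some 2) none) (pvEmitA folder s acc)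
termination_by texto _ => texto.length
decreasing_by simp [pysem]

def GeraCodBarraBoleto (valor : String) (images_folder : String) : String :=
  let texto := if valor.toList.length % 2 ≠ 0 then "0".toList ++ valor.toList else valor.toList
  let codbarras : List (List Char) :=
    ["<img src=\"".toList ++ images_folder.toList ++ "/p.gif\" width=\"".toList ++
      PySem.Int.toChars 1 ++ "\" height=\"".toList ++ PySem.Int.toChars 55 ++ "\" border=0>".toList,
     "<img src=\"".toList ++ images_folder.toList ++ "/b.gif\" width=\"".toList ++
      PySem.Int.toChars 1 ++ "\" height=\"".toList ++ PySem.Int.toChars 55 ++ "\" border=0>".toList,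
     "<img src=\"".toList ++ images_folder.toList ++ "/p.gif\" width=\"".toList ++
      PySem.Int.toChars 1 ++ "\" height=\"".toList ++ PySem.Int.toChars 55 ++ "\" border=0>".toList,
     "<img src=\"".toList ++ images_folder.toList ++ "/b.gif\" width=\"".toList ++
      PySem.Int.toChars 1 ++ "\" height=\"".toList ++ PySem.Int.toChars 55 ++ "\" border=0>".toList]
  let codbarras := pvLoopA images_folder pvTable texto codbarras
  let codbarras := codbarras ++
    ["<img src=\"".toList ++ images_folder.toList ++ "/p.gif\" width=\"".toList ++
      PySem.Int.toChars 4 ++ "\" height=\"".toList ++ PySem.Int.toChars 55 ++ "\" border=0>".toList,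
     "<img src=\"".toList ++ images_folder.toList ++ "/b.gif\" width=\"".toList ++
      PySem.Int.toChars 1 ++ "\" height=\"".toList ++ PySem.Int.toChars 55 ++ "\" border=0>".toList,
     "<img src=\"".toList ++ images_folder.toList ++ "/p.gif\" width=\"".toList ++
      PySem.Int.toChars 1 ++ "\" height=\"".toList ++ PySem.Int.toChars 55 ++ "\" border=0>".toList]
  String.ofList (PySem.Chars.join [] codbarras)

-- ===== PORT B =====
def pvBase : List (List Char) :=
  ["00110".toList, "10001".toList, "01001".toList, "11000".toList, "00101".toList,
   "10100".toList, "01100".toList, "00011".toList, "10010".toList, "01010".toList]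

-- Source B's local helper tag(img, w)
def pvTag (folder : String) (img : List Char) (w : Int) : List Char :=
  "<img src=\"".toList ++ folder.toList ++ "/".toList ++ img ++ "\" width=\"".toList ++
    PySem.Int.toChars w ++ "\" height=\"".toList ++ PySem.Int.toChars 55 ++ "\" border=0>".toList

-- 'for k in range(5)' emitting one p.gif and one b.gif tag per base digit
def pvEmitB (folder : String) (p b : List Char) (acc : List (List Char)) : List (List Char) :=
  (PySem.List.pyRange 0 5 1).foldl (fun a k =>
    (a ++ [pvTag folder "p.gif".toList
        (if (PySem.List.pyGet? p k).getD ' ' = '1' then 4 else 1)]) ++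
      [pvTag folder "b.gif".toList
        (if (PySem.List.pyGet? b k).getD ' ' = '1' then 4 else 1)]) acc

def pvLoopB (folder : String) : List Char → List (List Char) → List (List Char)
  | [], acc => acc
  | c :: t, acc =>
    let i := (PySem.Int.ofChars? (PySem.Chars.slice (c :: t) none (some 2))).getD 0
    let p := (PySem.List.pyGet? pvBase (PySem.Int.floordiv i 10)).getD []
    let b := (PySem.List.pyGet? pvBase (PySem.Int.mod i 10)).getD []
    pvLoopB folder (PySem.Chars.slice (c :: t) (some 2) none) (pvEmitB folder p b acc)
termination_by texto _ => texto.length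
decreasing_by simp [pysem]

def GeraCodBarraBoleto_alt (valor : String) (images_folder : String) : String :=
  let texto := if valor.toList.length % 2 = 0 then valor.toList else "0".toList ++ valor.toList
  let out : List (List Char) :=
    [pvTag images_folder "p.gif".toList 1, pvTag images_folder "b.gif".toList 1,
     pvTag images_folder "p.gif".toList 1, pvTag images_folder "b.gif".toList 1]
  let out := pvLoopB images_folder texto out
  let out := out ++ [pvTag images_folder "p.gif".toList 4, pvTag images_folder "b.gif".toList 1,
    pvTag images_folder "p.gif".toList 1]
  String.ofList (PySem.Chars.join [] out)

-- ===== PRECONDITION & SPEC =====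
-- the padded value split into its successive two-character chunks
def pvChunks : List Char → List (List Char)
  | [] => []
  | [c] => [[c]]
  | c :: d :: t => [c, d] :: pvChunks t

-- Pre_ excludes exactly the inputs on which Python's int() raises ValueError on some
-- two-character chunk of the (possibly '0'-padded) value; the -9..99 bound is automatic
-- for a two-character chunk and is stated only to keep the condition closed-form.
def Pre_GeraCodBarraBoleto (valor : String) (images_folder : String) : Prop :=
  ((pvChunks (if valor.toList.length % 2 = 0 then valor.toList else '0' :: valor.toList)).all
    (fun c => match PySem.Int.ofChars? c with
      | some i => decide (-9 ≤ i ∧ i ≤ 99)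
      | none => false)) = true
instance (valor : String) (images_folder : String) : Decidable (Pre_GeraCodBarraBoleto valor images_folder) := by
  unfold Pre_GeraCodBarraBoleto; infer_instance

def pvWitness_GeraCodBarraBoleto : String × String := ("12345", "images")

def Spec_GeraCodBarraBoleto (valor : String) (images_folder : String) (out : String) : Prop := out = GeraCodBarraBoleto_alt valor images_folder
instance (valor : String) (images_folder : String) (out : String) : Decidable (Spec_GeraCodBarraBoleto valor images_folder out) := by unfold Spec_GeraCodBarraBoleto; infer_instance

-- ===== CLAIM (what is proved, stated in full; the proofs are below) =====
def Claim_equal_GeraCodBarraBoleto : Prop := ∀ (valor : String) (images_folder : String), Dom_GeraCodBarraBoleto valor images_folder → Pre_GeraCodBarraBoleto valor images_folder → Spec_GeraCodBarraBoleto valor images_folder (GeraCodBarraBoleto valor images_folder)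

-- ===== LEMMAS AND PROOFS =====

-- the table A builds, written out (proof-only helper)
def pvTableLit : List (List Char) :=
  ["0000111100".toList,
   "0100101001".toList,
   "0001101001".toList,
   "0101101000".toList,
   "0000111001".toList,
   "0100111000".toList,
   "0001111000".toList,
   "0000101101".toList,
   "0100101100".toList,
   "0001101100".toList,
   "1000010110".toList,
   "1100000011".toList,
   "1001000011".toList,
   "1101000010".toList,
   "1000010011".toList,
   "1100010010".toList,
   "1001010010".toList,
   "1000000111".toList,
   "1100000110".toList,
   "1001000110".toList,
   "0010010110".toList,
   "0110000011".toList,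
   "0011000011".toList,
   "0111000010".toList,
   "0010010011".toList,
   "0110010010".toList,
   "0011010010".toList,
   "0010000111".toList,
   "0110000110".toList,
   "0011000110".toList,
   "1010010100".toList,
   "1110000001".toList,
   "1011000001".toList,
   "1111000000".toList,
   "1010010001".toList,
   "1110010000".toList,
   "1011010000".toList,
   "1010000101".toList,
   "1110000100".toList,
   "1011000100".toList,
   "0000110110".toList,
   "0100100011".toList,
   "0001100011".toList,
   "0101100010".toList,
   "0000110011".toList,
   "0100110010".toList,
   "0001110010".toList,
   "0000100111".toList,
   "0100100110".toList,
   "0001100110".toList,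
   "1000110100".toList,
   "1100100001".toList,
   "1001100001".toList,
   "1101100000".toList,
   "1000110001".toList,
   "1100110000".toList,
   "1001110000".toList,
   "1000100101".toList,
   "1100100100".toList,
   "1001100100".toList,
   "0010110100".toList,
   "0110100001".toList,
   "0011100001".toList,
   "0111100000".toList,
   "0010110001".toList,
   "0110110000".toList,
   "0011110000".toList,
   "0010100101".toList,
   "0110100100".toList,
   "0011100100".toList,
   "0000011110".toList,
   "0100001011".toList,
   "0001001011".toList,
   "0101001010".toList,
   "0000011011".toList,
   "0100011010".toList,
   "0001011010".toList,
   "0000001111".toList,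
   "0100001110".toList,
   "0001001110".toList,
   "1000011100".toList,
   "1100001001".toList,
   "1001001001".toList,
   "1101001000".toList,
   "1000011001".toList,
   "1100011000".toList,
   "1001011000".toList,
   "1000001101".toList,
   "1100001100".toList,
   "1001001100".toList,
   "0010011100".toList,
   "0110001001".toList,
   "0011001001".toList,
   "0111001000".toList,
   "0010011001".toList,
   "0110011000".toList,
   "0011011000".toList,
   "0010001101".toList,
   "0110001100".toList,
   "0011001100".toList]

set_option maxRecDepth 100000 in
set_option maxHeartbeats 1000000 in
lemma pvTable_eq : pvTable = pvTableLit := by decide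

-- A's inline f-string tags are Source B's tag helper
lemma pvPtag_eq (folder : String) (w : Int) :
    "<img src=\"".toList ++ folder.toList ++ "/p.gif\" width=\"".toList ++
      PySem.Int.toChars w ++ "\" height=\"".toList ++ PySem.Int.toChars 55 ++ "\" border=0>".toList
    = pvTag folder "p.gif".toList w := by
  simp [pvTag]

lemma pvBtag_eq (folder : String) (w : Int) :
    "<img src=\"".toList ++ folder.toList ++ "/b.gif\" width=\"".toList ++
      PySem.Int.toChars w ++ "\" height=\"".toList ++ PySem.Int.toChars 55 ++ "\" border=0>".toList
    = pvTag folder "b.gif".toList w := by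
  simp [pvTag]

-- the width pairs each emission loop walks through
def pvWidsA (s : List Char) : List (Int × Int) :=
  (PySem.List.pyRange 0 10 2).map (fun j =>
    (if (PySem.List.pyGet? s j).getD ' ' = '0' then 1 else 4,
     if (PySem.List.pyGet? s (j + 1)).getD ' ' = '0' then 1 else 4))

def pvWidsB (p b : List Char) : List (Int × Int) :=
  (PySem.List.pyRange 0 5 1).map (fun k =>
    (if (PySem.List.pyGet? p k).getD ' ' = '1' then 4 else 1,
     if (PySem.List.pyGet? b k).getD ' ' = '1' then 4 else 1))

lemma pvEmitA_wids (folder : String) (s : List Char) (acc : List (List Char)) :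
    pvEmitA folder s acc = (pvWidsA s).foldl
      (fun a w => (a ++ [pvTag folder "p.gif".toList w.1]) ++ [pvTag folder "b.gif".toList w.2]) acc := by
  unfold pvEmitA pvWidsA
  rw [List.foldl_map]
  simp only [pvPtag_eq, pvBtag_eq]

lemma pvEmitB_wids (folder : String) (p b : List Char) (acc : List (List Char)) :
    pvEmitB folder p b acc = (pvWidsB p b).foldl
      (fun a w => (a ++ [pvTag folder "p.gif".toList w.1]) ++ [pvTag folder "b.gif".toList w.2]) acc := by
  unfold pvEmitB pvWidsB
  rw [List.foldl_map]

set_option maxRecDepth 100000 in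
set_option maxHeartbeats 1000000 in
lemma pvWids_eq : ∀ k : Nat, k < 109 →
    pvWidsA ((PySem.List.pyGet? pvTableLit ((k : Int) - 9)).getD []) =
      pvWidsB ((PySem.List.pyGet? pvBase (PySem.Int.floordiv ((k : Int) - 9) 10)).getD [])
        ((PySem.List.pyGet? pvBase (PySem.Int.mod ((k : Int) - 9) 10)).getD []) := by
  decide

lemma pvEmit_eq (i : Int) (h1 : -9 ≤ i) (h2 : i ≤ 99) (folder : String) (acc : List (List Char)) :
    pvEmitA folder ((PySem.List.pyGet? pvTable i).getD []) acc =
      pvEmitB folder ((PySem.List.pyGet? pvBase (PySem.Int.floordiv i 10)).getD [])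
        ((PySem.List.pyGet? pvBase (PySem.Int.mod i 10)).getD []) acc := by
  rw [pvTable_eq, pvEmitA_wids, pvEmitB_wids]
  have hk := pvWids_eq (i + 9).toNat (by omega)
  have hi : ((i + 9).toNat : Int) - 9 = i := by omega
  rw [hi] at hk
  rw [hk]

lemma pvChunks_cons (c : Char) (t : List Char) :
    pvChunks (c :: t) = (c :: t.take 1) :: pvChunks (t.drop 1) := by
  cases t <;> simp [pvChunks]

lemma pvLoop_eq (folder : String) : ∀ (n : Nat) (t : List Char), t.length ≤ n →
    ((pvChunks t).all (fun c => match PySem.Int.ofChars? c with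
      | some i => decide (-9 ≤ i ∧ i ≤ 99)
      | none => false)) = true →
    ∀ acc, pvLoopA folder pvTable t acc = pvLoopB folder t acc := by
  intro n
  induction n with
  | zero =>
    intro t hlen _ acc
    have ht : t = [] := List.length_eq_zero_iff.mp (Nat.le_zero.mp hlen)
    subst ht; simp [pvLoopA, pvLoopB]
  | succ n ih =>
    intro t hlen hok acc
    match t with
    | [] => simp [pvLoopA, pvLoopB]
    | c :: t' =>
      rw [pvChunks_cons] at hok
      simp only [List.all_cons, Bool.and_eq_true] at hok
      obtain ⟨hhd, htl⟩ := hok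
      cases hof : PySem.Int.ofChars? (c :: t'.take 1) with
      | none => rw [hof] at hhd; simp at hhd
      | some i =>
        rw [hof] at hhd
        have hb : -9 ≤ i ∧ i ≤ 99 := by simpa using hhd
        rw [pvLoopA, pvLoopB]
        have hsl : PySem.List.slice (c :: t') none (some 2) = c :: List.take 1 t' := by
          simp [pysem]
        have hsr : PySem.List.slice (c :: t') (some 2) none = List.drop 1 t' := by
          simp [pysem]
        simp only [PySem.Chars.slice_eq_listSlice, hsl, hsr, hof, Option.getD_some]
        rw [pvEmit_eq i hb.1 hb.2]
        exact ih (t'.drop 1) (by simp at hlen ⊢; omega) htl _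

theorem GeraCodBarraBoleto_spec : Claim_equal_GeraCodBarraBoleto := by
  intro valor images_folder _ hpre
  unfold Spec_GeraCodBarraBoleto GeraCodBarraBoleto GeraCodBarraBoleto_alt
  unfold Pre_GeraCodBarraBoleto at hpre
  have h0 : ("0".toList ++ valor.toList : List Char) = '0' :: valor.toList := rfl
  by_cases h : valor.toList.length % 2 = 0
  · simp only [h, if_pos, if_neg, not_true, ne_eq, not_false_iff, pvPtag_eq, pvBtag_eq] at hpre ⊢
    rw [pvLoop_eq images_folder valor.toList.length valor.toList le_rfl hpre]
  · simp only [h, if_pos, if_neg, ne_eq, not_false_iff, pvPtag_eq, pvBtag_eq, h0] at hpre ⊢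
    rw [pvLoop_eq images_folder ('0' :: valor.toList).length ('0' :: valor.toList) le_rfl hpre]
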